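-- pv_equiv track=rewrite | github.com/sokrypton/ColabFold | colabfold/input.py | msa_to_str
-- ===== SOURCE A (Python) =====
-- from typing import List, Optional, Tuple, Union, Dict
--
-- def pair_sequences(
--     a3m_lines: List[str], query_sequences: List[str], query_cardinality: List[int]
-- ) -> str:
--     a3m_line_paired = [""] * len(a3m_lines[0].splitlines())
--     for n, seq in enumerate(query_sequences):
--         lines = a3m_lines[n].splitlines()
--         for i, line in enumerate(lines):
--             if line.startswith(">"):
--                 if n != 0:
--                     line = line.replace(">", "\t", 1)
--                 a3m_line_paired[i] = a3m_line_paired[i] + line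
--             else:
--                 a3m_line_paired[i] = a3m_line_paired[i] + line * query_cardinality[n]
--     return "\n".join(a3m_line_paired)
--
-- def pad_sequences(
--     a3m_lines: List[str], query_sequences: List[str], query_cardinality: List[int]
-- ) -> str:
--     _blank_seq = [
--         ("-" * len(seq))
--         for n, seq in enumerate(query_sequences)
--         for _ in range(query_cardinality[n])
--     ]
--     a3m_lines_combined = []
--     pos = 0
--     for n, seq in enumerate(query_sequences):
--         for j in range(0, query_cardinality[n]):
--             lines = a3m_lines[n].split("\n")
--             for a3m_line in lines:
--                 if len(a3m_line) == 0:
--                     continue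
--                 if a3m_line.startswith(">"):
--                     a3m_lines_combined.append(a3m_line)
--                 else:
--                     a3m_lines_combined.append(
--                         "".join(_blank_seq[:pos] + [a3m_line] + _blank_seq[pos + 1 :])
--                     )
--             pos += 1
--     return "\n".join(a3m_lines_combined)
--
-- def pair_msa(
--     query_seqs_unique: List[str],
--     query_seqs_cardinality: List[int],
--     paired_msa: Optional[List[str]],
--     unpaired_msa: Optional[List[str]],
-- ) -> str:
--     if paired_msa is None and unpaired_msa is not None:
--         a3m_lines = pad_sequences(
--             unpaired_msa, query_seqs_unique, query_seqs_cardinality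
--         )
--     elif paired_msa is not None and unpaired_msa is not None:
--         a3m_lines = (
--             pair_sequences(paired_msa, query_seqs_unique, query_seqs_cardinality)
--             + "\n"
--             + pad_sequences(unpaired_msa, query_seqs_unique, query_seqs_cardinality)
--         )
--     elif paired_msa is not None and unpaired_msa is None:
--         a3m_lines = pair_sequences(
--             paired_msa, query_seqs_unique, query_seqs_cardinality
--         )
--     else:
--         raise ValueError(f"Invalid pairing")
--     return a3m_lines
--
-- def msa_to_str(
--     unpaired_msa: List[str],
--     paired_msa: List[str],
--     query_seqs_unique: List[str],
--     query_seqs_cardinality: List[int],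
-- ) -> str:
--     msa = "#" + ",".join(map(str, map(len, query_seqs_unique))) + "\t"
--     msa += ",".join(map(str, query_seqs_cardinality)) + "\n"
--     # build msa with cardinality of 1, it makes it easier to parse and manipulate
--     query_seqs_cardinality = [1 for _ in query_seqs_cardinality]
--     msa += pair_msa(query_seqs_unique, query_seqs_cardinality, paired_msa, unpaired_msa)
--     return msa
-- ===== SOURCE B (Python) =====
-- def msa_to_str(
--     unpaired_msa,
--     paired_msa,
--     query_seqs_unique,
--     query_seqs_cardinality,
-- ):
--     msa = "#" + ",".join(map(str, map(len, query_seqs_unique))) + "\t"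
--     msa += ",".join(map(str, query_seqs_cardinality)) + "\n"
--     k = len(query_seqs_unique)
--     # paired block, assembled row-major: for each output row collect the piece
--     # contributed by each per-sequence alignment, instead of accumulating
--     # column-by-column into a mutable row table.
--     tables = [s.splitlines() for s in paired_msa[:k]]
--     width = len(paired_msa[0].splitlines())
--     rows = []
--     for i in range(width):
--         parts = []
--         for n, lines in enumerate(tables):
--             if i < len(lines):
--                 line = lines[i]
--                 if line.startswith(">") and n != 0:
--                     line = "\t" + line[1:]
--                 parts.append(line)
--         rows.append("".join(parts))
--     paired_block = "\n".join(rows)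
--     # padded block: precompute, by two linear scans, the gap prefix and suffix
--     # of every query position, then emit prefix + line + suffix per line.
--     blanks = ["-" * len(seq) for seq in query_seqs_unique]
--     prefixes = []
--     acc = ""
--     for b in blanks:
--         prefixes.append(acc)
--         acc = acc + b
--     suffixes_rev = []
--     acc = ""
--     for b in reversed(blanks):
--         suffixes_rev.append(acc)
--         acc = b + acc
--     suffixes = suffixes_rev[::-1]
--     out = []
--     for n in range(k):
--         for line in unpaired_msa[n].split("\n"):
--             if len(line) == 0:
--                 continue
--             if line.startswith(">"):
--                 out.append(line)
--             else:
--                 out.append(prefixes[n] + line + suffixes[n])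
--     padded_block = "\n".join(out)
--     return msa + paired_block + "\n" + padded_block
-- ===== Notes on version B (the rewrite author's own statement) =====
-- stated objective: alternative
-- what changed: The paired block is assembled row-major (one pass per output row collecting each sequence's piece) instead of column-by-column updates into a mutable row table, and the padded block uses gap prefix/suffix strings precomputed by two linear scans instead of re-slicing and re-joining the blank list for every emitted line.
import Mathlib
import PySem

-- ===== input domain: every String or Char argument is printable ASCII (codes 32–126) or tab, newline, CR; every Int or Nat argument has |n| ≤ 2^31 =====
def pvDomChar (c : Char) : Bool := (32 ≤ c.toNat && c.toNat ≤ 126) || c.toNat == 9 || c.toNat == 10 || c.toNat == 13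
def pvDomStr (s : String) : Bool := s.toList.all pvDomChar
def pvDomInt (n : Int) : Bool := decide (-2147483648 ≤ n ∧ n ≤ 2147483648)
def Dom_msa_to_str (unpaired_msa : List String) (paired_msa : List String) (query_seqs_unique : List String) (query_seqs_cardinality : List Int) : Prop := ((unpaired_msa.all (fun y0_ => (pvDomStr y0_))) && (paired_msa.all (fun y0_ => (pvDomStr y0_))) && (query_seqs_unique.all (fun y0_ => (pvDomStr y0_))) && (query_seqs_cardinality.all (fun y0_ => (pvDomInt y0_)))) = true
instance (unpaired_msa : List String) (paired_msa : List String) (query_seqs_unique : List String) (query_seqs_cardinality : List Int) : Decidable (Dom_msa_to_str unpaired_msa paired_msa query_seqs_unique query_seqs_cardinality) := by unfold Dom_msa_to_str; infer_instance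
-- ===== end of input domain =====

-- ===== PORT A =====
-- B assembles the paired block row-major and precomputes gap prefix/suffix strings
-- for the padded block; A updates a mutable row table column-by-column and re-slices
-- and re-joins the blank list per emitted line.  Same return value on Pre_.

-- line.replace(">", "\t", 1): replace the FIRST occurrence; exact because pattern and
-- replacement are single characters.
def pvRepl1 : List Char → List Char
  | [] => []
  | c :: rest => if c = '>' then '\t' :: rest else c :: pvRepl1 rest

-- the two header lines, identical in Source A and Source B:
-- "#" + ",".join(map(str, map(len, qs))) + "\t" + ",".join(map(str, card)) + "\n"
def pvHeader (query_seqs_unique : List String) (query_seqs_cardinality : List Int) : List Char :=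
  '#' :: (PySem.Chars.join [','] (query_seqs_unique.map (fun s => PySem.Int.toChars (PySem.Chars.len s.toList)))
    ++ ['\t'] ++ PySem.Chars.join [','] (query_seqs_cardinality.map PySem.Int.toChars) ++ ['\n'])

-- pair_sequences: column-major accumulation into a row table (a3m_lines[0] is pyGetD:
-- Python raises IndexError on [], excluded by Pre_)
def pvPairSequences (a3m_lines : List String) (query_sequences : List String) (query_cardinality : List Int) : List Char :=
  PySem.Chars.join ['\n']
    ((PySem.List.enumerate query_sequences).foldl (fun acc p =>
      (PySem.List.enumerate (PySem.Chars.splitlines (PySem.List.pyGetD a3m_lines p.1 "").toList)).foldl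
        (fun acc2 q =>
          if PySem.Chars.startswith q.2 ['>'] then
            PySem.List.pySetD acc2 q.1 (PySem.List.pyGetD acc2 q.1 [] ++
              (if p.1 ≠ 0 then pvRepl1 q.2 else q.2))
          else
            PySem.List.pySetD acc2 q.1 (PySem.List.pyGetD acc2 q.1 [] ++
              PySem.List.pyRepeat q.2 (PySem.List.pyGetD query_cardinality p.1 0))) acc)
      (List.replicate (PySem.Chars.splitlines (PySem.List.pyGetD a3m_lines 0 "").toList).length []))

-- pad_sequences ("-"*len(seq) is List.replicate: length is nonnegative, exact)
def pvBlankSeq (query_sequences : List String) (query_cardinality : List Int) : List (List Char) :=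
  (PySem.List.enumerate query_sequences).flatMap (fun p =>
    (PySem.List.pyRange 0 (PySem.List.pyGetD query_cardinality p.1 0)).map
      (fun _ => List.replicate p.2.toList.length '-'))

def pvPadSequences (a3m_lines : List String) (query_sequences : List String) (query_cardinality : List Int) : List Char :=
  PySem.Chars.join ['\n']
    (((PySem.List.enumerate query_sequences).foldl
      (fun (st : List (List Char) × Int) p =>
        (PySem.List.pyRange 0 (PySem.List.pyGetD query_cardinality p.1 0)).foldl
          (fun (st : List (List Char) × Int) _ =>
            ((PySem.Chars.splitOn (PySem.List.pyGetD a3m_lines p.1 "").toList ['\n']).foldl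
              (fun c line =>
                if line.length = 0 then c
                else if PySem.Chars.startswith line ['>'] then c ++ [line]
                else c ++ [PySem.Chars.join []
                  (PySem.List.slice (pvBlankSeq query_sequences query_cardinality) none (some st.2) ++ [line] ++
                   PySem.List.slice (pvBlankSeq query_sequences query_cardinality) (some (st.2 + 1)) none)]) st.1,
             st.2 + 1)) st)
      (([] : List (List Char)), (0 : Int))).1)

-- msa_to_str: both msa arguments are lists (never None), so pair_msa takes its
-- 'paired and unpaired' branch: pair_sequences + "\n" + pad_sequences.
def msa_to_str (unpaired_msa : List String) (paired_msa : List String) (query_seqs_unique : List String) (query_seqs_cardinality : List Int) : String :=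
  let ones := query_seqs_cardinality.map (fun _ => (1 : Int))
  String.ofList (pvHeader query_seqs_unique query_seqs_cardinality
    ++ pvPairSequences paired_msa query_seqs_unique ones
    ++ ['\n'] ++ pvPadSequences unpaired_msa query_seqs_unique ones)

-- ===== PORT B =====
-- the two header lines of Source B (textually the same two lines as in Source A)
def pvHeaderAlt (query_seqs_unique : List String) (query_seqs_cardinality : List Int) : List Char :=
  '#' :: (PySem.Chars.join [','] (query_seqs_unique.map (fun s => PySem.Int.toChars (PySem.Chars.len s.toList)))
    ++ ['\t'] ++ PySem.Chars.join [','] (query_seqs_cardinality.map PySem.Int.toChars) ++ ['\n'])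

def msa_to_str_alt (unpaired_msa : List String) (paired_msa : List String) (query_seqs_unique : List String) (query_seqs_cardinality : List Int) : String :=
  let k := query_seqs_unique.length
  -- tables = [s.splitlines() for s in paired_msa[:k]]
  let tables := (PySem.List.slice paired_msa none (some (k : Int))).map
    (fun s => PySem.Chars.splitlines s.toList)
  let width := (PySem.Chars.splitlines (PySem.List.pyGetD paired_msa 0 "").toList).length
  -- row-major assembly of the paired block
  let rows := (PySem.List.pyRange 0 (width : Int)).foldl (fun rows i =>
    let parts := (PySem.List.enumerate tables).foldl (fun parts nl =>
      if i < (nl.2.length : Int) then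
        parts ++ [if PySem.Chars.startswith (PySem.List.pyGetD nl.2 i []) ['>'] && nl.1 != 0
                  then '\t' :: (PySem.List.pyGetD nl.2 i []).drop 1
                  else PySem.List.pyGetD nl.2 i []]
      else parts) ([] : List (List Char))
    rows ++ [PySem.Chars.join [] parts]) ([] : List (List Char))
  let pairedBlock := PySem.Chars.join ['\n'] rows
  -- gap prefixes / suffixes by two linear scans
  let blanks := query_seqs_unique.map (fun s => List.replicate s.toList.length '-')
  let pres := (blanks.foldl (fun (st : List (List Char) × List Char) b =>
    (st.1 ++ [st.2], st.2 ++ b)) ([], [])).1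
  let sufsRev := (blanks.reverse.foldl (fun (st : List (List Char) × List Char) b =>
    (st.1 ++ [st.2], b ++ st.2)) ([], [])).1
  let sufs := sufsRev.reverse   -- suffixes_rev[::-1] (PySem.List.slice?_none_none_neg_one)
  let out := (PySem.List.pyRange 0 (k : Int)).foldl (fun out n =>
    (PySem.Chars.splitOn (PySem.List.pyGetD unpaired_msa n "").toList ['\n']).foldl (fun out line =>
      if line.length = 0 then out
      else if PySem.Chars.startswith line ['>'] then out ++ [line]
      else out ++ [PySem.List.pyGetD pres n [] ++ line ++ PySem.List.pyGetD sufs n []]) out)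
    ([] : List (List Char))
  let paddedBlock := PySem.Chars.join ['\n'] out
  String.ofList (pvHeaderAlt query_seqs_unique query_seqs_cardinality
    ++ pairedBlock ++ ['\n'] ++ paddedBlock)

-- ===== PRECONDITION & SPEC =====
-- Pre_ is exactly where the Python A returns: it excludes only inputs on which A raises
-- IndexError (paired_msa empty, or any of the four lists shorter than query_seqs_unique
-- where A indexes it), plus paired alignments whose line count exceeds that of the first
-- one (pair_sequences then assigns past the end of its row table and raises IndexError).
def Pre_msa_to_str (unpaired_msa : List String) (paired_msa : List String) (query_seqs_unique : List String) (query_seqs_cardinality : List Int) : Prop :=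
  paired_msa ≠ [] ∧
  query_seqs_unique.length ≤ paired_msa.length ∧
  query_seqs_unique.length ≤ unpaired_msa.length ∧
  query_seqs_unique.length ≤ query_seqs_cardinality.length ∧
  ∀ s ∈ paired_msa.take query_seqs_unique.length,
    (PySem.Chars.splitlines s.toList).length ≤
      (PySem.Chars.splitlines ((paired_msa.getD 0 "").toList)).length

instance (unpaired_msa : List String) (paired_msa : List String) (query_seqs_unique : List String) (query_seqs_cardinality : List Int) : Decidable (Pre_msa_to_str unpaired_msa paired_msa query_seqs_unique query_seqs_cardinality) := by
  unfold Pre_msa_to_str; infer_instance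

def pvWitness_msa_to_str : List String × List String × List String × List Int :=
  ([">q1\nAC\n", ">q2\nGT\n"], [">p1\nAC", ">p2\nGT"], ["AC", "GT"], [2, 1])

def Spec_msa_to_str (unpaired_msa : List String) (paired_msa : List String) (query_seqs_unique : List String) (query_seqs_cardinality : List Int) (out : String) : Prop := out = msa_to_str_alt unpaired_msa paired_msa query_seqs_unique query_seqs_cardinality
instance (unpaired_msa : List String) (paired_msa : List String) (query_seqs_unique : List String) (query_seqs_cardinality : List Int) (out : String) : Decidable (Spec_msa_to_str unpaired_msa paired_msa query_seqs_unique query_seqs_cardinality out) := by unfold Spec_msa_to_str; infer_instance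

-- ===== CLAIM (what is proved, stated in full; the proofs are below) =====
def Claim_equal_msa_to_str : Prop := ∀ (unpaired_msa : List String) (paired_msa : List String) (query_seqs_unique : List String) (query_seqs_cardinality : List Int), Dom_msa_to_str unpaired_msa paired_msa query_seqs_unique query_seqs_cardinality → Pre_msa_to_str unpaired_msa paired_msa query_seqs_unique query_seqs_cardinality → Spec_msa_to_str unpaired_msa paired_msa query_seqs_unique query_seqs_cardinality (msa_to_str unpaired_msa paired_msa query_seqs_unique query_seqs_cardinality)

-- ===== LEMMAS AND PROOFS =====

theorem pv_join_nil_flatten (l : List (List Char)) : PySem.Chars.join [] l = l.flatten := by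
  induction l with
  | nil => rfl
  | cons a t ih => cases t with
    | nil => simp [PySem.Chars.join_singleton]
    | cons b r => rw [PySem.Chars.join_cons_cons]; simp_all

theorem pv_pyRepeat_one {α : Type} (xs : List α) : PySem.List.pyRepeat xs 1 = xs := by
  simp [PySem.List.pyRepeat]

theorem pv_ones_getD (c : List Int) (n : Int) (h0 : 0 ≤ n) (h1 : n < (c.length : Int)) :
    PySem.List.pyGetD (c.map (fun _ => (1 : Int))) n 0 = 1 := by
  rw [PySem.List.pyGetD_eq_getElem _ _ h0 (by simpa using h1)]
  simp

theorem pv_pySetD_natCast {α : Type} (xs : List α) (s : Nat) (v : α) (h : s < xs.length) :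
    PySem.List.pySetD xs (s : Int) v = xs.set s v := by
  simp [PySem.List.pySetD, PySem.List.pySet?, PySem.List.pyIdx?, h]

theorem pv_pyGetD_lt {α : Type} (xs : List α) (s : Nat) (d : α) (h : s < xs.length) :
    PySem.List.pyGetD xs (s : Int) d = xs[s] := by
  simp [PySem.List.pyGetD_natCast, List.getD, h]

theorem pv_pair_inner (f : List Char → List Char) :
    ∀ (ls : List (List Char)) (s : Nat) (acc : List (List Char))
      (hlen : s + ls.length ≤ acc.length),
    ((PySem.List.enumerate ls (s : Int)).foldl (fun a q =>
        PySem.List.pySetD a q.1 (PySem.List.pyGetD a q.1 [] ++ f q.2)) acc).length = acc.length ∧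
    ∀ (i : Nat),
      ((PySem.List.enumerate ls (s : Int)).foldl (fun a q =>
        PySem.List.pySetD a q.1 (PySem.List.pyGetD a q.1 [] ++ f q.2)) acc)[i]? =
      acc[i]?.map (fun a => if s ≤ i ∧ i - s < ls.length then a ++ f (ls.getD (i - s) []) else a) := by
  intro ls
  induction ls with
  | nil =>
    intro s acc _hlen
    constructor
    · simp [PySem.List.enumerate]
    · intro i
      simp [PySem.List.enumerate]
  | cons l rest ih =>
    intro s acc hlen
    have hs : s < acc.length := by simp at hlen; omega
    rw [PySem.List.enumerate_cons]
    have hcast : (s : Int) + 1 = ((s + 1 : Nat) : Int) := by push_cast; ring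
    simp only [List.foldl_cons, pv_pySetD_natCast _ _ _ hs, pv_pyGetD_lt _ _ _ hs, hcast]
    have hlen2 : (s + 1) + rest.length ≤ (acc.set s (acc[s] ++ f l)).length := by
      simp at hlen ⊢; omega
    obtain ⟨ihl, ihe⟩ := ih (s + 1) (acc.set s (acc[s] ++ f l)) hlen2
    constructor
    · rw [ihl]; simp
    · intro i
      rw [ihe i]
      rw [List.getElem?_set]
      by_cases h1 : s = i
      · subst h1
        simp [hs]
      · by_cases h2 : s + 1 ≤ i ∧ i - (s + 1) < rest.length
        · have : i - (s + 1) + 1 = i - s := by omega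
          simp [h2, h1, show s ≤ i ∧ i - s < rest.length + 1 by omega, ← this]
        · by_cases h3 : i < acc.length
          · simp [List.getElem?_eq_getElem h3, h1]
            split_ifs with ha hb
            all_goals first | rfl | (exfalso; omega)
          · simp [List.getElem?_eq_none_iff.mpr (by omega : acc.length ≤ i)]
            omega

theorem pv_pair_outer (G : Int → List Char → List Char) (T : Int → List (List Char)) :
    ∀ (ns : List Int) (acc : List (List Char))
      (hT : ∀ n ∈ ns, (T n).length ≤ acc.length),
    (ns.foldl (fun a n => (PySem.List.enumerate (T n)).foldl (fun a2 q =>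
        PySem.List.pySetD a2 q.1 (PySem.List.pyGetD a2 q.1 [] ++ G n q.2)) a) acc).length = acc.length ∧
    ∀ i : Nat, (ns.foldl (fun a n => (PySem.List.enumerate (T n)).foldl (fun a2 q =>
        PySem.List.pySetD a2 q.1 (PySem.List.pyGetD a2 q.1 [] ++ G n q.2)) a) acc)[i]? =
      acc[i]?.map (fun a => a ++
        ((ns.filter (fun n => decide (i < (T n).length))).map
          (fun n => G n ((T n).getD i []))).flatten) := by
  intro ns
  induction ns with
  | nil =>
    intro acc _hT
    constructor
    · rfl
    · intro i; simp
  | cons n ns' ih =>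
    intro acc hT
    have hinner := pv_pair_inner (fun line => G n line) (T n) 0 acc
      (by simpa using hT n (by simp))
    simp only [Nat.cast_zero] at hinner
    obtain ⟨hl1, he1⟩ := hinner
    set acc1 := (PySem.List.enumerate (T n) 0).foldl (fun a2 q =>
        PySem.List.pySetD a2 q.1 (PySem.List.pyGetD a2 q.1 [] ++ G n q.2)) acc with hacc1
    obtain ⟨hl2, he2⟩ := ih acc1 (by rw [hl1]; exact fun m hm => hT m (by simp [hm]))
    constructor
    · simp only [List.foldl_cons]; rw [hl2, hl1]
    · intro i
      simp only [List.foldl_cons]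
      rw [he2 i, he1 i, Option.map_map]
      rcases acc[i]? with _ | a
      · simp
      · simp only [Option.map_some, Function.comp]
        by_cases hc : i < (T n).length
        · simp [hc]
        · simp [hc]

-- pvRepl1 on a line starting with '>' is '\t' :: tail
theorem pv_repl1_eq (line : List Char) (h : PySem.Chars.startswith line ['>'] = true) :
    pvRepl1 line = '\t' :: line.drop 1 := by
  cases line with
  | nil => simp [PySem.Chars.startswith] at h
  | cons c rest =>
    have : c = '>' := by
      simp [PySem.Chars.startswith, List.isPrefixOf] at h
      exact h.symm
    simp [pvRepl1, this]

-- a scan that records the running accumulator before each step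
theorem pv_scan {α β : Type} (f : β → α → β) :
    ∀ (l : List α) (acc : List β) (a : β),
    l.foldl (fun st b => (st.1 ++ [st.2], f st.2 b)) (acc, a) =
      (acc ++ (List.range l.length).map (fun n => (l.take n).foldl f a), l.foldl f a) := by
  intro l
  induction l with
  | nil => intro acc a; simp
  | cons x xs ih =>
    intro acc a
    simp only [List.foldl_cons, ih, List.length_cons, List.range_succ_eq_map,
      List.map_cons, List.map_map, List.take_zero, List.foldl_nil]
    simp [Function.comp_def, List.take_succ_cons]

-- pad outer loop: the position counter equals the enumeration index
theorem pv_pad_outer {X : Type} (F : Int × String → Int → List X) :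
    ∀ (qsl : List String) (s : Int) (acc : List X),
    (PySem.List.enumerate qsl s).foldl (fun st p => (st.1 ++ F p st.2, st.2 + 1)) (acc, s) =
      (acc ++ (PySem.List.enumerate qsl s).flatMap (fun p => F p p.1), s + qsl.length) := by
  intro qsl
  induction qsl with
  | nil => intro s acc; simp [PySem.List.enumerate]
  | cons x xs ih =>
    intro s acc
    rw [PySem.List.enumerate_cons]
    simp only [List.foldl_cons, List.flatMap_cons, ih (s + 1) (acc ++ F (s, x) s)]
    simp only [Prod.mk.injEq]
    refine ⟨by simp, by push_cast [List.length_cons]; omega⟩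

def pvG (n : Int) (line : List Char) : List Char :=
  if PySem.Chars.startswith line ['>'] then (if n ≠ 0 then pvRepl1 line else line) else line

theorem pv_gB_eq (n : Int) (line : List Char) :
    (if PySem.Chars.startswith line ['>'] && n != 0
     then '\t' :: line.drop 1 else line) = pvG n line := by
  unfold pvG
  by_cases h1 : PySem.Chars.startswith line ['>'] = true
  · by_cases h2 : n = 0 <;> simp [h1, h2, pv_repl1_eq line h1]
  · simp [eq_false_of_ne_true h1]

theorem pv_pair_eq (p q : List String) (c : List Int) (h2 : q.length ≤ p.length)
    (h4 : q.length ≤ c.length)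
    (h5 : ∀ s ∈ p.take q.length,
      (PySem.Chars.splitlines s.toList).length ≤
        (PySem.Chars.splitlines ((p.getD 0 "").toList)).length) :
    pvPairSequences p q (c.map (fun _ => (1 : Int))) =
    PySem.Chars.join ['\n'] ((PySem.List.pyRange 0 ((PySem.Chars.splitlines (PySem.List.pyGetD p 0 "").toList).length : Int)).foldl
      (fun rows i =>
        let parts := (PySem.List.enumerate ((PySem.List.slice p none (some (q.length : Int))).map
            (fun s => PySem.Chars.splitlines s.toList))).foldl (fun parts nl =>
          if i < (nl.2.length : Int) then
            parts ++ [if PySem.Chars.startswith (PySem.List.pyGetD nl.2 i []) ['>'] && nl.1 != 0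
                      then '\t' :: (PySem.List.pyGetD nl.2 i []).drop 1
                      else PySem.List.pyGetD nl.2 i []]
          else parts) ([] : List (List Char))
        rows ++ [PySem.Chars.join [] parts]) ([] : List (List Char))) := by
  unfold pvPairSequences
  set k := q.length with hk
  set T : Int → List (List Char) :=
    fun n => PySem.Chars.splitlines (PySem.List.pyGetD p n "").toList with hTdef
  set width := (PySem.Chars.splitlines (PySem.List.pyGetD p 0 "").toList).length with hwidth
  have hTbound : ∀ n : Int, 0 ≤ n → n < (k : Int) → (T n).length ≤ width := by
    intro n hn0 hnk
    have hlt : n.toNat < k := by omega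
    have hg : PySem.List.pyGetD p n "" = p[n.toNat]'(by omega) :=
      PySem.List.pyGetD_eq_getElem p "" hn0 (by omega)
    rw [hTdef]
    simp only [hg, hwidth, PySem.List.pyGetD_zero]
    refine h5 _ ?_
    have hb : n.toNat < (p.take k).length := by simp; omega
    have hmem := List.getElem_mem hb
    rwa [List.getElem_take] at hmem
  -- A side: fold over row indices
  have hAfold :
      (PySem.List.enumerate q).foldl (fun acc pp =>
        (PySem.List.enumerate (PySem.Chars.splitlines (PySem.List.pyGetD p pp.1 "").toList)).foldl
          (fun acc2 q2 =>
            if PySem.Chars.startswith q2.2 ['>'] then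
              PySem.List.pySetD acc2 q2.1 (PySem.List.pyGetD acc2 q2.1 [] ++
                (if pp.1 ≠ 0 then pvRepl1 q2.2 else q2.2))
            else
              PySem.List.pySetD acc2 q2.1 (PySem.List.pyGetD acc2 q2.1 [] ++
                PySem.List.pyRepeat q2.2 (PySem.List.pyGetD (c.map (fun _ => (1:Int))) pp.1 0))) acc)
        (List.replicate width ([] : List Char)) =
      (PySem.List.pyRange 0 (k : Int)).foldl (fun a n =>
        (PySem.List.enumerate (T n)).foldl (fun a2 q2 =>
          PySem.List.pySetD a2 q2.1 (PySem.List.pyGetD a2 q2.1 [] ++ pvG n q2.2)) a)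
        (List.replicate width ([] : List Char)) := by
    have hrange : PySem.List.pyRange 0 (k : Int) =
        (PySem.List.enumerate q).map (fun x => x.1) := by
      rw [PySem.List.map_fst_enumerate]; norm_num [hk]
    rw [hrange, List.foldl_map]
    apply PySem.List.foldl_congr_mem
    intro acc pp hpp
    obtain ⟨j, hj, rfl⟩ := (PySem.List.mem_enumerate_iff q 0 pp).mp hpp
    simp only [zero_add]
    apply PySem.List.foldl_congr_mem
    intro acc2 q2 _
    have hones : PySem.List.pyGetD (c.map (fun _ => (1:Int))) (j : Int) 0 = 1 :=
      pv_ones_getD c _ (by positivity) (by simp; omega)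
    rw [hones, pv_pyRepeat_one]
    unfold pvG
    split_ifs <;> rfl
  rw [hAfold]
  obtain ⟨hAlen, hAelem⟩ := pv_pair_outer pvG T (PySem.List.pyRange 0 (k : Int))
    (List.replicate width ([] : List Char))
    (by
      intro n hn
      rw [PySem.List.mem_pyRange_one] at hn
      simpa using hTbound n hn.1 hn.2)
  congr 1
  -- B side: the row loop is a map over row indices
  have hBmap : ∀ (i : Int),
      (PySem.List.enumerate ((PySem.List.slice p none (some (k : Int))).map
          (fun s => PySem.Chars.splitlines s.toList))).foldl (fun parts nl =>
        if i < (nl.2.length : Int) then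
          parts ++ [if PySem.Chars.startswith (PySem.List.pyGetD nl.2 i []) ['>'] && nl.1 != 0
                    then '\t' :: (PySem.List.pyGetD nl.2 i []).drop 1
                    else PySem.List.pyGetD nl.2 i []]
        else parts) ([] : List (List Char)) =
      ((PySem.List.pyRange 0 (k : Int)).filter (fun n => decide (i < ((T n).length : Int)))).map
        (fun n => pvG n (PySem.List.pyGetD (T n) i [])) := by
    intro i
    have htab : (PySem.List.slice p none (some (k : Int))).map
        (fun s => PySem.Chars.splitlines s.toList) =
        (p.take k).map (fun s => PySem.Chars.splitlines s.toList) := by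
      rw [PySem.List.slice_to_natCast]
    rw [htab, PySem.List.enumerate_eq_map_pyRange _ ([] : List (List Char)), List.foldl_map]
    have hlen : PySem.List.len ((p.take k).map (fun s => PySem.Chars.splitlines s.toList)) = (k : Int) := by
      simp [PySem.List.len]; omega
    rw [hlen]
    have hcongr := PySem.List.foldl_congr_mem (PySem.List.pyRange 0 (k : Int))
      (fun parts (j : Int) =>
        if i < (((PySem.List.pyGetD ((p.take k).map (fun s => PySem.Chars.splitlines s.toList)) j []).length : Nat) : Int) then
          parts ++ [if PySem.Chars.startswith (PySem.List.pyGetD (PySem.List.pyGetD ((p.take k).map (fun s => PySem.Chars.splitlines s.toList)) j []) i []) ['>'] && j != 0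
                    then '	' :: (PySem.List.pyGetD (PySem.List.pyGetD ((p.take k).map (fun s => PySem.Chars.splitlines s.toList)) j []) i []).drop 1
                    else PySem.List.pyGetD (PySem.List.pyGetD ((p.take k).map (fun s => PySem.Chars.splitlines s.toList)) j []) i []]
        else parts)
      (fun parts (j : Int) =>
        if (fun n => decide (i < ((T n).length : Int))) j = true then
          parts ++ [pvG j (PySem.List.pyGetD (T j) i [])] else parts)
      ([] : List (List Char))
      (by
        intro acc j hj
        rw [PySem.List.mem_pyRange_one] at hj
        have hTj : PySem.List.pyGetD ((p.take k).map (fun s => PySem.Chars.splitlines s.toList)) j [] = T j := by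
          have hjk : j.toNat < k := by omega
          have h1 : PySem.List.pyGetD ((p.take k).map (fun s => PySem.Chars.splitlines s.toList)) j [] =
              ((p.take k).map (fun s => PySem.Chars.splitlines s.toList))[j.toNat]'(by simp; omega) :=
            PySem.List.pyGetD_eq_getElem _ _ hj.1 (by simp; omega)
          have h2' : PySem.List.pyGetD p j "" = p[j.toNat]'(by omega) :=
            PySem.List.pyGetD_eq_getElem p "" hj.1 (by omega)
          rw [h1, hTdef]
          simp [h2', List.getElem_take]
        simp only [hTj, pv_gB_eq]
        by_cases hc : i < ((T j).length : Int) <;> simp [hc])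
    rw [hcongr, PySem.List.foldl_append_if]
    simp
  simp only [hBmap]
  simp only [PySem.List.foldl_append_singleton_eq_map, List.nil_append]
  apply List.ext_getElem?
  intro i
  rw [hAelem i, PySem.List.pyRange_zero_natCast width]
  by_cases hi : i < width
  · simp only [List.getElem?_map, List.getElem?_range, hi, if_pos,
      List.getElem?_replicate, Option.map_some]
    rw [pv_join_nil_flatten]
    simp [PySem.List.pyGetD_natCast, Nat.cast_lt]
  · have h1' : width ≤ i := by omega
    simp [hi, List.length_replicate]

theorem pv_flatten_singleton {α β : Type} (f : α → β) (l : List α) :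
    (l.map (fun x => [f x])).flatten = l.map f := by
  induction l <;> simp_all

theorem pv_foldl_append_flatten (l : List (List Char)) (init : List Char) :
    l.foldl (· ++ ·) init = init ++ l.flatten := by
  induction l generalizing init <;> simp_all

theorem pv_foldl_rev_flatten (l : List (List Char)) (init : List Char) :
    l.foldl (fun a b => b ++ a) init = l.reverse.flatten ++ init := by
  induction l generalizing init <;> simp_all

theorem pv_pad_eq (u q : List String) (c : List Int) (h4 : q.length ≤ c.length) :
    pvPadSequences u q (c.map (fun _ => (1 : Int))) =
    (let blanks := q.map (fun s => List.replicate s.toList.length '-')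
     let pres := (blanks.foldl (fun (st : List (List Char) × List Char) b =>
       (st.1 ++ [st.2], st.2 ++ b)) ([], [])).1
     let sufsRev := (blanks.reverse.foldl (fun (st : List (List Char) × List Char) b =>
       (st.1 ++ [st.2], b ++ st.2)) ([], [])).1
     let sufs := sufsRev.reverse
     PySem.Chars.join ['\n'] ((PySem.List.pyRange 0 (q.length : Int)).foldl (fun out n =>
       (PySem.Chars.splitOn (PySem.List.pyGetD u n "").toList ['\n']).foldl (fun out line =>
         if line.length = 0 then out
         else if PySem.Chars.startswith line ['>'] then out ++ [line]
         else out ++ [PySem.List.pyGetD pres n [] ++ line ++ PySem.List.pyGetD sufs n []]) out)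
       ([] : List (List Char)))) := by
  unfold pvPadSequences
  set k := q.length with hk
  set blanks := q.map (fun s => List.replicate s.toList.length '-') with hblanks
  have hones : ∀ n : Int, 0 ≤ n → n < (k : Int) →
      PySem.List.pyGetD (c.map (fun _ => (1 : Int))) n 0 = 1 := by
    intro n h0 h1
    exact pv_ones_getD c n h0 (by omega)
  have hr01 : PySem.List.pyRange 0 1 = [(0 : Int)] := by decide
  -- the blank-sequence list is one gap row per query
  have hblank : pvBlankSeq q (c.map (fun _ => (1 : Int))) = blanks := by
    unfold pvBlankSeq
    rw [List.flatMap_def]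
    rw [List.map_congr_left (g := fun p : Int × String => [List.replicate p.2.toList.length '-'])
      (by
        intro p hp
        obtain ⟨j, hj, rfl⟩ := (PySem.List.mem_enumerate_iff q 0 p).mp hp
        rw [hones _ (by positivity) (by omega), hr01]
        rfl)]
    have : (PySem.List.enumerate q).map (fun p : Int × String => [List.replicate p.2.toList.length '-']) =
        ((PySem.List.enumerate q).map (·.2)).map (fun s => [List.replicate s.toList.length '-']) := by
      rw [List.map_map]; rfl
    rw [this, PySem.List.map_snd_enumerate]
    exact pv_flatten_singleton _ q
  -- normalise A's outer loop: single inner iteration, per-line fold as append-of-map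
  set H : Int → List Char → List Char := fun pos line =>
    if PySem.Chars.startswith line ['>'] then line
    else PySem.Chars.join [] (PySem.List.slice blanks none (some pos) ++ [line] ++
      PySem.List.slice blanks (some (pos + 1)) none) with hH
  set F : Int × String → Int → List (List Char) := fun p pos =>
    ((PySem.Chars.splitOn (PySem.List.pyGetD u p.1 "").toList ['\n']).filter
      (fun line => !decide (line.length = 0))).map (H pos) with hF
  have hAcongr := PySem.List.foldl_congr_mem (PySem.List.enumerate q)
    (fun (st : List (List Char) × Int) p =>
      (PySem.List.pyRange 0 (PySem.List.pyGetD (c.map (fun _ => (1:Int))) p.1 0)).foldl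
        (fun (st : List (List Char) × Int) _ =>
          ((PySem.Chars.splitOn (PySem.List.pyGetD u p.1 "").toList ['\n']).foldl
            (fun c2 line =>
              if line.length = 0 then c2
              else if PySem.Chars.startswith line ['>'] then c2 ++ [line]
              else c2 ++ [PySem.Chars.join []
                (PySem.List.slice (pvBlankSeq q (c.map (fun _ => (1:Int)))) none (some st.2) ++ [line] ++
                 PySem.List.slice (pvBlankSeq q (c.map (fun _ => (1:Int)))) (some (st.2 + 1)) none)]) st.1,
             st.2 + 1)) st)
    (fun st p => (st.1 ++ F p st.2, st.2 + 1))
    (([] : List (List Char)), (0 : Int))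
    (by
      intro st p hp
      obtain ⟨j, hj, rfl⟩ := (PySem.List.mem_enumerate_iff q 0 p).mp hp
      beta_reduce
      simp only [zero_add]
      rw [hones _ (by positivity) (by omega), hr01]
      simp only [List.foldl_cons, List.foldl_nil, hblank]
      refine Prod.ext ?_ rfl
      simp only []
      rw [PySem.List.foldl_congr_mem _ _ (fun c2 line =>
          if (fun line => !decide ((line : List Char).length = 0)) line = true
          then c2 ++ [H st.2 line] else c2) st.1 (by
        intro c2 line _
        by_cases h0 : line.length = 0
        · simp [h0]
        · by_cases h1 : PySem.Chars.startswith line ['>'] = true <;>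
            simp [h0, h1, hH])]
      rw [PySem.List.foldl_append_if, hF])
  rw [hAcongr, pv_pad_outer F q 0 []]
  simp only [List.nil_append]
  -- B side: prefixes and suffixes are flattened takes and drops
  have hkb : blanks.length = k := by rw [hblanks, List.length_map, hk]
  have hpres : (blanks.foldl (fun (st : List (List Char) × List Char) b =>
      (st.1 ++ [st.2], st.2 ++ b)) ([], [])).1 =
      (List.range k).map (fun n => (blanks.take n).flatten) := by
    rw [pv_scan (fun a b => a ++ b) blanks [] []]
    simp only [List.nil_append, hkb]
    exact List.map_congr_left (fun n _ => by rw [pv_foldl_append_flatten]; simp)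
  have hsufs : ((blanks.reverse.foldl (fun (st : List (List Char) × List Char) b =>
      (st.1 ++ [st.2], b ++ st.2)) ([], [])).1).reverse =
      ((List.range k).map (fun j => (blanks.drop (k - j)).flatten)).reverse := by
    rw [pv_scan (fun a b => b ++ a) blanks.reverse [] []]
    simp only [List.nil_append, List.length_reverse, hkb]
    congr 1
    refine List.map_congr_left (fun j _ => ?_)
    rw [pv_foldl_rev_flatten, List.take_reverse, List.reverse_reverse, hkb]
    simp
  -- B outer loop as flatMap
  have hBcongr := PySem.List.foldl_congr_mem (PySem.List.pyRange 0 (k : Int))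
    (fun (out : List (List Char)) n =>
      (PySem.Chars.splitOn (PySem.List.pyGetD u n "").toList ['\n']).foldl (fun out line =>
        if line.length = 0 then out
        else if PySem.Chars.startswith line ['>'] then out ++ [line]
        else out ++ [PySem.List.pyGetD ((blanks.foldl (fun (st : List (List Char) × List Char) b =>
            (st.1 ++ [st.2], st.2 ++ b)) ([], [])).1) n [] ++ line ++
          PySem.List.pyGetD (((blanks.reverse.foldl (fun (st : List (List Char) × List Char) b =>
            (st.1 ++ [st.2], b ++ st.2)) ([], [])).1).reverse) n []]) out)
    (fun out n => out ++
      ((PySem.Chars.splitOn (PySem.List.pyGetD u n "").toList ['\n']).filter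
        (fun line => !decide (line.length = 0))).map (fun line =>
          if PySem.Chars.startswith line ['>'] then line
          else PySem.List.pyGetD ((List.range k).map (fun m => (blanks.take m).flatten)) n [] ++ line ++
            PySem.List.pyGetD (((List.range k).map (fun j => (blanks.drop (k - j)).flatten)).reverse) n []))
    ([] : List (List Char))
    (by
      intro out n _
      beta_reduce
      rw [PySem.List.foldl_congr_mem _ _ (fun c2 line =>
          if (fun line => !decide ((line : List Char).length = 0)) line = true
          then c2 ++ [if PySem.Chars.startswith line ['>'] then line
            else PySem.List.pyGetD ((List.range k).map (fun m => (blanks.take m).flatten)) n [] ++ line ++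
              PySem.List.pyGetD (((List.range k).map (fun j => (blanks.drop (k - j)).flatten)).reverse) n []]
          else c2) out (by
        intro c2 line _
        by_cases h0 : line.length = 0
        · simp [h0]
        · rw [hpres, hsufs]
          by_cases h1 : PySem.Chars.startswith line ['>'] = true <;>
            simp [h0, h1])]
      rw [PySem.List.foldl_append_if])
  rw [hBcongr, PySem.List.foldl_append_eq_flatMap, List.nil_append]
  -- both sides are flatMaps over the query indices
  congr 1
  rw [PySem.List.enumerate_eq_map_pyRange q "", List.flatMap_map]
  have hlenq : PySem.List.len q = (k : Int) := by simp [PySem.List.len, hk]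
  rw [hlenq]
  rw [List.flatMap_def, List.flatMap_def]
  congr 1
  refine List.map_congr_left (fun n hn => ?_)
  rw [PySem.List.mem_pyRange_one] at hn
  simp only [hF]
  refine List.map_congr_left (fun line _ => ?_)
  rw [hH]
  by_cases h1 : PySem.Chars.startswith line ['>'] = true
  · simp [h1]
  · simp only [h1, if_neg, Bool.not_eq_true]
    have hn1 : (0 : Int) ≤ n + 1 := by omega
    have htn : (n + 1).toNat = n.toNat + 1 := by omega
    rw [PySem.List.slice_to blanks hn.1, PySem.List.slice_from blanks hn1, htn,
      pv_join_nil_flatten]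
    have hnk : n.toNat < k := by omega
    have hgp : PySem.List.pyGetD ((List.range k).map (fun m => (blanks.take m).flatten)) n [] =
        (blanks.take n.toNat).flatten := by
      rw [PySem.List.pyGetD_eq_getElem _ _ hn.1 (by simp; omega)]
      simp
    have hgs : PySem.List.pyGetD (((List.range k).map (fun j => (blanks.drop (k - j)).flatten)).reverse) n [] =
        (blanks.drop (n.toNat + 1)).flatten := by
      rw [PySem.List.pyGetD_eq_getElem _ _ hn.1 (by simp; omega)]
      rw [List.getElem_reverse]
      simp only [List.getElem_map, List.getElem_range, List.length_map, List.length_range]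
      congr 2
      omega
    rw [hgp, hgs]
    simp

-- ===== VERDICT (by name: the statement is the Claim_ definition above) =====
theorem msa_to_str_spec : Claim_equal_msa_to_str := by
  intro u p q c _hdom hpre
  obtain ⟨h1, h2, h3, h4, h5⟩ := hpre
  unfold Spec_msa_to_str msa_to_str msa_to_str_alt
  simp only []
  rw [pv_pair_eq p q c h2 h4 h5, pv_pad_eq u q c h4]
  rfl
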